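-- pv_equiv track=rewrite | github.com/KIMDONGHYEON003/TIL | STUDY/챌린지/ch_1/s1.py | solution
-- ===== SOURCE A (Python) =====
-- def solution(numbers):
--     numbers = sorted(numbers)
--     num_lst = [0] * 10
--     result = 0
--
--     for i in range(len(num_lst)):
--         for num in numbers:
--             if i == num:
--                 num_lst[i] += num
--
--     for k in range(len(num_lst)):
--         if num_lst[k] == 0:
--             result += k
--
--     return result
-- ===== SOURCE B (Python) =====
-- def solution(numbers):
--     present = {n for n in numbers if 0 <= n <= 9}
--     return 45 - sum(present)
-- ===== Notes on version B (the rewrite author's own statement) =====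
-- stated objective: faster
-- what changed: Replaces the sort plus the ten digit-by-digit scans over the whole list (and the per-digit tally array) by a single pass that collects the set of values lying in 0..9 and returns 45 minus its sum.
import Mathlib
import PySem

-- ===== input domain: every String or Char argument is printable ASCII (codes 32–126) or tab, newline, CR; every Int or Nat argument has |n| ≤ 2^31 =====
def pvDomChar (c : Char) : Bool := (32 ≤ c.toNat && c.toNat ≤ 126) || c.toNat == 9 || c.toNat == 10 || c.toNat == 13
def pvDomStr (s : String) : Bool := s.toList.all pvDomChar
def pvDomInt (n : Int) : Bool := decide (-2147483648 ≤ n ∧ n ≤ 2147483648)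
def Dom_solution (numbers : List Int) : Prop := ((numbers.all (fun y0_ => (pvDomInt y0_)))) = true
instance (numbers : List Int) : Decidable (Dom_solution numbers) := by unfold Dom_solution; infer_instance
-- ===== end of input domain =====

-- B replaces A's sort, ten per-digit scans and tally array by one pass collecting the set of values in 0..9 and returning 45 minus its sum (faster, measured).

-- ===== PORT A =====
def solution (numbers : List Int) : Int :=
  let numbers := PySem.List.sorted numbers (fun x => x) false
  let num_lst : List Int := List.replicate 10 0
  let num_lst := (PySem.List.pyRange 0 (num_lst.length : Int) 1).foldl (fun lst i =>
      numbers.foldl (fun lst num =>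
        if i == num then PySem.List.pySetD lst i (PySem.List.pyGetD lst i 0 + num) else lst) lst) num_lst
  (PySem.List.pyRange 0 (num_lst.length : Int) 1).foldl (fun result k =>
      if PySem.List.pyGetD num_lst k 0 == 0 then result + k else result) 0

-- ===== PORT B =====
def solution_alt (numbers : List Int) : Int :=
  let present : PySem.Set Int := PySem.Set.ofList (numbers.filter (fun n => decide (0 ≤ n) && decide (n ≤ 9)))
  45 - present.sum

-- ===== PRECONDITION & SPEC =====
def Spec_solution (numbers : List Int) (out : Int) : Prop := out = solution_alt numbers
instance (numbers : List Int) (out : Int) : Decidable (Spec_solution numbers out) := by unfold Spec_solution; infer_instance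

-- ===== CLAIM (what is proved, stated in full; the proofs are below) =====
def Claim_equal_solution : Prop := ∀ (numbers : List Int), Dom_solution numbers → Spec_solution numbers (solution numbers)

-- ===== LEMMAS AND PROOFS =====

lemma inner (i : Int) (hi0 : 0 ≤ i) (ns : List Int) : ∀ (lst : List Int), i.toNat < lst.length →
    ns.foldl (fun l num => if i == num then PySem.List.pySetD l i (PySem.List.pyGetD l i 0 + num) else l) lst
    = lst.set i.toNat (lst.getD i.toNat 0 + i * ns.count i) := by
  induction ns with
  | nil =>
    intro lst hi
    simp only [List.foldl_nil, List.count_nil, Nat.cast_zero, mul_zero, add_zero]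
    rw [List.getD_eq_getElem _ _ hi, List.set_getElem_self]
  | cons n ns ih =>
    intro lst hi
    simp only [List.foldl_cons]
    by_cases h : i = n
    · subst h
      rw [if_pos (show (i == i) = true by simp)]
      rw [PySem.List.pySetD_of_nonneg _ _ hi0, PySem.List.pyGetD_eq_getElem _ _ hi0 (by omega)]
      rw [ih _ (by simpa using hi), List.set_set]
      have hgd : ∀ v : Int, (lst.set i.toNat v).getD i.toNat 0 = v := fun v => by
        rw [List.getD_eq_getElem _ _ (by simpa using hi)]
        exact List.getElem_set_self _
      rw [hgd, List.getD_eq_getElem _ _ hi, List.count_cons_self]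
      congr 1
      push_cast
      ring
    · rw [if_neg (by simpa using h)]
      rw [ih _ hi, List.count_cons_of_ne (fun hh => h hh.symm)]

lemma Bsum (numbers : List Int) :
    (PySem.Set.ofList (numbers.filter (fun n => decide (0 ≤ n) && decide (n ≤ 9)))).sum
    = (([0,1,2,3,4,5,6,7,8,9] : List Int).filter (fun k => numbers.contains k)).sum := by
  apply List.Perm.sum_eq
  apply List.perm_of_nodup_nodup_toFinset_eq (PySem.Set.nodup_ofList _)
  · exact List.Nodup.filter _ (by decide)
  · ext x
    simp only [List.mem_toFinset, PySem.Set.mem_ofList, List.mem_filter, List.contains_iff_mem,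
      decide_eq_true_eq, Bool.and_eq_true]
    constructor
    · rintro ⟨hx, h0, h9⟩
      refine ⟨?_, hx⟩
      simp only [List.mem_cons, List.not_mem_nil, or_false]
      omega
    · rintro ⟨hm, hx⟩
      refine ⟨hx, ?_, ?_⟩ <;> simp only [List.mem_cons, List.not_mem_nil, or_false] at hm <;> omega


lemma step0 (s : List Int) :
    List.foldl (fun l num => if (0 : Int) == num then PySem.List.pySetD l 0 (PySem.List.pyGetD l 0 0 + num) else l) (List.replicate 10 (0 : Int)) s = ([0 + 0 * (List.count 0 s : Int), 0, 0, 0, 0, 0, 0, 0, 0, 0] : List Int) := by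
  rw [inner 0 (by norm_num) s (List.replicate 10 (0 : Int)) (by simp)]
  rfl


lemma step1 (s : List Int) :
    List.foldl (fun l num => if (1 : Int) == num then PySem.List.pySetD l 1 (PySem.List.pyGetD l 1 0 + num) else l) (([0 + 0 * (List.count 0 s : Int), 0, 0, 0, 0, 0, 0, 0, 0, 0] : List Int)) s = ([0 + 0 * (List.count 0 s : Int), 0 + 1 * (List.count 1 s : Int), 0, 0, 0, 0, 0, 0, 0, 0] : List Int) := by
  rw [inner 1 (by norm_num) s (([0 + 0 * (List.count 0 s : Int), 0, 0, 0, 0, 0, 0, 0, 0, 0] : List Int)) (by simp)]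
  rfl


lemma step2 (s : List Int) :
    List.foldl (fun l num => if (2 : Int) == num then PySem.List.pySetD l 2 (PySem.List.pyGetD l 2 0 + num) else l) (([0 + 0 * (List.count 0 s : Int), 0 + 1 * (List.count 1 s : Int), 0, 0, 0, 0, 0, 0, 0, 0] : List Int)) s = ([0 + 0 * (List.count 0 s : Int), 0 + 1 * (List.count 1 s : Int), 0 + 2 * (List.count 2 s : Int), 0, 0, 0, 0, 0, 0, 0] : List Int) := by
  rw [inner 2 (by norm_num) s (([0 + 0 * (List.count 0 s : Int), 0 + 1 * (List.count 1 s : Int), 0, 0, 0, 0, 0, 0, 0, 0] : List Int)) (by simp)]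
  rfl


lemma step3 (s : List Int) :
    List.foldl (fun l num => if (3 : Int) == num then PySem.List.pySetD l 3 (PySem.List.pyGetD l 3 0 + num) else l) (([0 + 0 * (List.count 0 s : Int), 0 + 1 * (List.count 1 s : Int), 0 + 2 * (List.count 2 s : Int), 0, 0, 0, 0, 0, 0, 0] : List Int)) s = ([0 + 0 * (List.count 0 s : Int), 0 + 1 * (List.count 1 s : Int), 0 + 2 * (List.count 2 s : Int), 0 + 3 * (List.count 3 s : Int), 0, 0, 0, 0, 0, 0] : List Int) := by
  rw [inner 3 (by norm_num) s (([0 + 0 * (List.count 0 s : Int), 0 + 1 * (List.count 1 s : Int), 0 + 2 * (List.count 2 s : Int), 0, 0, 0, 0, 0, 0, 0] : List Int)) (by simp)]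
  rfl


lemma step4 (s : List Int) :
    List.foldl (fun l num => if (4 : Int) == num then PySem.List.pySetD l 4 (PySem.List.pyGetD l 4 0 + num) else l) (([0 + 0 * (List.count 0 s : Int), 0 + 1 * (List.count 1 s : Int), 0 + 2 * (List.count 2 s : Int), 0 + 3 * (List.count 3 s : Int), 0, 0, 0, 0, 0, 0] : List Int)) s = ([0 + 0 * (List.count 0 s : Int), 0 + 1 * (List.count 1 s : Int), 0 + 2 * (List.count 2 s : Int), 0 + 3 * (List.count 3 s : Int), 0 + 4 * (List.count 4 s : Int), 0, 0, 0, 0, 0] : List Int) := by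
  rw [inner 4 (by norm_num) s (([0 + 0 * (List.count 0 s : Int), 0 + 1 * (List.count 1 s : Int), 0 + 2 * (List.count 2 s : Int), 0 + 3 * (List.count 3 s : Int), 0, 0, 0, 0, 0, 0] : List Int)) (by simp)]
  rfl


lemma step5 (s : List Int) :
    List.foldl (fun l num => if (5 : Int) == num then PySem.List.pySetD l 5 (PySem.List.pyGetD l 5 0 + num) else l) (([0 + 0 * (List.count 0 s : Int), 0 + 1 * (List.count 1 s : Int), 0 + 2 * (List.count 2 s : Int), 0 + 3 * (List.count 3 s : Int), 0 + 4 * (List.count 4 s : Int), 0, 0, 0, 0, 0] : List Int)) s = ([0 + 0 * (List.count 0 s : Int), 0 + 1 * (List.count 1 s : Int), 0 + 2 * (List.count 2 s : Int), 0 + 3 * (List.count 3 s : Int), 0 + 4 * (List.count 4 s : Int), 0 + 5 * (List.count 5 s : Int), 0, 0, 0, 0] : List Int) := by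
  rw [inner 5 (by norm_num) s (([0 + 0 * (List.count 0 s : Int), 0 + 1 * (List.count 1 s : Int), 0 + 2 * (List.count 2 s : Int), 0 + 3 * (List.count 3 s : Int), 0 + 4 * (List.count 4 s : Int), 0, 0, 0, 0, 0] : List Int)) (by simp)]
  rfl


lemma step6 (s : List Int) :
    List.foldl (fun l num => if (6 : Int) == num then PySem.List.pySetD l 6 (PySem.List.pyGetD l 6 0 + num) else l) (([0 + 0 * (List.count 0 s : Int), 0 + 1 * (List.count 1 s : Int), 0 + 2 * (List.count 2 s : Int), 0 + 3 * (List.count 3 s : Int), 0 + 4 * (List.count 4 s : Int), 0 + 5 * (List.count 5 s : Int), 0, 0, 0, 0] : List Int)) s = ([0 + 0 * (List.count 0 s : Int), 0 + 1 * (List.count 1 s : Int), 0 + 2 * (List.count 2 s : Int), 0 + 3 * (List.count 3 s : Int), 0 + 4 * (List.count 4 s : Int), 0 + 5 * (List.count 5 s : Int), 0 + 6 * (List.count 6 s : Int), 0, 0, 0] : List Int) := by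
  rw [inner 6 (by norm_num) s (([0 + 0 * (List.count 0 s : Int), 0 + 1 * (List.count 1 s : Int), 0 + 2 * (List.count 2 s : Int), 0 + 3 * (List.count 3 s : Int), 0 + 4 * (List.count 4 s : Int), 0 + 5 * (List.count 5 s : Int), 0, 0, 0, 0] : List Int)) (by simp)]
  rfl


lemma step7 (s : List Int) :
    List.foldl (fun l num => if (7 : Int) == num then PySem.List.pySetD l 7 (PySem.List.pyGetD l 7 0 + num) else l) (([0 + 0 * (List.count 0 s : Int), 0 + 1 * (List.count 1 s : Int), 0 + 2 * (List.count 2 s : Int), 0 + 3 * (List.count 3 s : Int), 0 + 4 * (List.count 4 s : Int), 0 + 5 * (List.count 5 s : Int), 0 + 6 * (List.count 6 s : Int), 0, 0, 0] : List Int)) s = ([0 + 0 * (List.count 0 s : Int), 0 + 1 * (List.count 1 s : Int), 0 + 2 * (List.count 2 s : Int), 0 + 3 * (List.count 3 s : Int), 0 + 4 * (List.count 4 s : Int), 0 + 5 * (List.count 5 s : Int), 0 + 6 * (List.count 6 s : Int), 0 + 7 * (List.count 7 s : Int), 0, 0] : List Int) := by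
  rw [inner 7 (by norm_num) s (([0 + 0 * (List.count 0 s : Int), 0 + 1 * (List.count 1 s : Int), 0 + 2 * (List.count 2 s : Int), 0 + 3 * (List.count 3 s : Int), 0 + 4 * (List.count 4 s : Int), 0 + 5 * (List.count 5 s : Int), 0 + 6 * (List.count 6 s : Int), 0, 0, 0] : List Int)) (by simp)]
  rfl


lemma step8 (s : List Int) :
    List.foldl (fun l num => if (8 : Int) == num then PySem.List.pySetD l 8 (PySem.List.pyGetD l 8 0 + num) else l) (([0 + 0 * (List.count 0 s : Int), 0 + 1 * (List.count 1 s : Int), 0 + 2 * (List.count 2 s : Int), 0 + 3 * (List.count 3 s : Int), 0 + 4 * (List.count 4 s : Int), 0 + 5 * (List.count 5 s : Int), 0 + 6 * (List.count 6 s : Int), 0 + 7 * (List.count 7 s : Int), 0, 0] : List Int)) s = ([0 + 0 * (List.count 0 s : Int), 0 + 1 * (List.count 1 s : Int), 0 + 2 * (List.count 2 s : Int), 0 + 3 * (List.count 3 s : Int), 0 + 4 * (List.count 4 s : Int), 0 + 5 * (List.count 5 s : Int), 0 + 6 * (List.count 6 s : Int), 0 + 7 * (List.count 7 s : Int), 0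 + 8 * (List.count 8 s : Int), 0] : List Int) := by
  rw [inner 8 (by norm_num) s (([0 + 0 * (List.count 0 s : Int), 0 + 1 * (List.count 1 s : Int), 0 + 2 * (List.count 2 s : Int), 0 + 3 * (List.count 3 s : Int), 0 + 4 * (List.count 4 s : Int), 0 + 5 * (List.count 5 s : Int), 0 + 6 * (List.count 6 s : Int), 0 + 7 * (List.count 7 s : Int), 0, 0] : List Int)) (by simp)]
  rfl


lemma step9 (s : List Int) :
    List.foldl (fun l num => if (9 : Int) == num then PySem.List.pySetD l 9 (PySem.List.pyGetD l 9 0 + num) else l) (([0 + 0 * (List.count 0 s : Int), 0 + 1 * (List.count 1 s : Int), 0 + 2 * (List.count 2 s : Int), 0 + 3 * (List.count 3 s : Int), 0 + 4 * (List.count 4 s : Int), 0 + 5 * (List.count 5 s : Int), 0 + 6 * (List.count 6 s : Int), 0 + 7 * (List.count 7 s : Int), 0 + 8 * (List.count 8 s : Int), 0] : List Int)) s = ([0 + 0 * (List.count 0 s : Int), 0 + 1 * (List.count 1 s : Int), 0 + 2 * (List.count 2 s : Int), 0 + 3 * (List.count 3 s : Int), 0 + 4 * (List.count 4 s : Int),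 0 + 5 * (List.count 5 s : Int), 0 + 6 * (List.count 6 s : Int), 0 + 7 * (List.count 7 s : Int), 0 + 8 * (List.count 8 s : Int), 0 + 9 * (List.count 9 s : Int)] : List Int) := by
  rw [inner 9 (by norm_num) s (([0 + 0 * (List.count 0 s : Int), 0 + 1 * (List.count 1 s : Int), 0 + 2 * (List.count 2 s : Int), 0 + 3 * (List.count 3 s : Int), 0 + 4 * (List.count 4 s : Int), 0 + 5 * (List.count 5 s : Int), 0 + 6 * (List.count 6 s : Int), 0 + 7 * (List.count 7 s : Int), 0 + 8 * (List.count 8 s : Int), 0] : List Int)) (by simp)]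
  rfl



lemma ite_add_right (c : Prop) [Decidable c] (r k : Int) : (if c then r + k else r) = r + (if c then k else 0) := by
  split_ifs <;> simp

lemma ite_add_left (c : Prop) [Decidable c] (k rest : Int) : (if c then k + rest else rest) = (if c then k else 0) + rest := by
  split_ifs <;> simp

set_option maxHeartbeats 4000000 in
lemma solution_eq_alt (numbers : List Int) : solution numbers = solution_alt numbers := by
  unfold solution solution_alt
  simp only []
  set s := PySem.List.sorted numbers (fun x => x) false with hs
  have hcnt : ∀ k : Int, List.count k s = List.count k numbers :=
    fun k => (PySem.List.sorted_perm numbers (fun x => x) false).count_eq k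
  rw [show PySem.List.pyRange 0 ((List.replicate 10 (0:Int)).length : Int) 1 = [0,1,2,3,4,5,6,7,8,9] from by decide]
  simp only [List.foldl_cons, List.foldl_nil]
  simp only [step0 s, step1 s, step2 s, step3 s, step4 s, step5 s, step6 s, step7 s, step8 s, step9 s]
  simp only [show ((([0 + 0 * (List.count 0 s : Int), 0 + 1 * (List.count 1 s : Int), 0 + 2 * (List.count 2 s : Int), 0 + 3 * (List.count 3 s : Int), 0 + 4 * (List.count 4 s : Int), 0 + 5 * (List.count 5 s : Int), 0 + 6 * (List.count 6 s : Int), 0 + 7 * (List.count 7 s : Int), 0 + 8 * (List.count 8 s : Int), 0 + 9 * (List.count 9 s : Int)] : List Int) : List Int).length : Int) = 10 from by simp]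
  simp only [show PySem.List.pyRange 0 (10 : Int) 1 = [0,1,2,3,4,5,6,7,8,9] from by decide]
  simp only [List.foldl_cons, List.foldl_nil, ite_add_right]
  have r0 : PySem.List.pyGetD (([0 + 0 * (List.count 0 s : Int), 0 + 1 * (List.count 1 s : Int), 0 + 2 * (List.count 2 s : Int), 0 + 3 * (List.count 3 s : Int), 0 + 4 * (List.count 4 s : Int), 0 + 5 * (List.count 5 s : Int), 0 + 6 * (List.count 6 s : Int), 0 + 7 * (List.count 7 s : Int), 0 + 8 * (List.count 8 s : Int), 0 + 9 * (List.count 9 s : Int)] : List Int) : List Int) (0 : Int) 0 = 0 + 0 * (List.count 0 s : Int) := rfl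
  have r1 : PySem.List.pyGetD (([0 + 0 * (List.count 0 s : Int), 0 + 1 * (List.count 1 s : Int), 0 + 2 * (List.count 2 s : Int), 0 + 3 * (List.count 3 s : Int), 0 + 4 * (List.count 4 s : Int), 0 + 5 * (List.count 5 s : Int), 0 + 6 * (List.count 6 s : Int), 0 + 7 * (List.count 7 s : Int), 0 + 8 * (List.count 8 s : Int), 0 + 9 * (List.count 9 s : Int)] : List Int) : List Int) (1 : Int) 0 = 0 + 1 * (List.count 1 s : Int) := rfl
  have r2 : PySem.List.pyGetD (([0 + 0 * (List.count 0 s : Int), 0 + 1 * (List.count 1 s : Int), 0 + 2 * (List.count 2 s : Int), 0 + 3 * (List.count 3 s : Int), 0 + 4 * (List.count 4 s : Int), 0 + 5 * (List.count 5 s : Int), 0 + 6 * (List.count 6 s : Int), 0 + 7 * (List.count 7 s : Int), 0 + 8 * (List.count 8 s : Int), 0 + 9 * (List.count 9 s : Int)] : List Int) : List Int) (2 : Int) 0 = 0 + 2 * (List.count 2 s : Int) := rfl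
  have r3 : PySem.List.pyGetD (([0 + 0 * (List.count 0 s : Int), 0 + 1 * (List.count 1 s : Int), 0 + 2 * (List.count 2 s : Int), 0 + 3 * (List.count 3 s : Int), 0 + 4 * (List.count 4 s : Int), 0 + 5 * (List.count 5 s : Int), 0 + 6 * (List.count 6 s : Int), 0 + 7 * (List.count 7 s : Int), 0 + 8 * (List.count 8 s : Int), 0 + 9 * (List.count 9 s : Int)] : List Int) : List Int) (3 : Int) 0 = 0 + 3 * (List.count 3 s : Int) := rfl
  have r4 : PySem.List.pyGetD (([0 + 0 * (List.count 0 s : Int), 0 + 1 * (List.count 1 s : Int), 0 + 2 * (List.count 2 s : Int), 0 + 3 * (List.count 3 s : Int), 0 + 4 * (List.count 4 s : Int), 0 + 5 * (List.count 5 s : Int), 0 + 6 * (List.count 6 s : Int), 0 + 7 * (List.count 7 s : Int), 0 + 8 * (List.count 8 s : Int), 0 + 9 * (List.count 9 s : Int)] : List Int) : List Int) (4 : Int) 0 = 0 + 4 * (List.count 4 s : Int) := rfl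
  have r5 : PySem.List.pyGetD (([0 + 0 * (List.count 0 s : Int), 0 + 1 * (List.count 1 s : Int), 0 + 2 * (List.count 2 s : Int), 0 + 3 * (List.count 3 s : Int), 0 + 4 * (List.count 4 s : Int), 0 + 5 * (List.count 5 s : Int), 0 + 6 * (List.count 6 s : Int), 0 + 7 * (List.count 7 s : Int), 0 + 8 * (List.count 8 s : Int), 0 + 9 * (List.count 9 s : Int)] : List Int) : List Int) (5 : Int) 0 = 0 + 5 * (List.count 5 s : Int) := rfl
  have r6 : PySem.List.pyGetD (([0 + 0 * (List.count 0 s : Int), 0 + 1 * (List.count 1 s : Int), 0 + 2 * (List.count 2 s : Int), 0 + 3 * (List.count 3 s : Int), 0 + 4 * (List.count 4 s : Int), 0 + 5 * (List.count 5 s : Int), 0 + 6 * (List.count 6 s : Int), 0 + 7 * (List.count 7 s : Int), 0 + 8 * (List.count 8 s : Int), 0 + 9 * (List.count 9 s : Int)] : List Int) : List Int) (6 : Int) 0 = 0 + 6 * (List.count 6 s : Int) := rfl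
  have r7 : PySem.List.pyGetD (([0 + 0 * (List.count 0 s : Int), 0 + 1 * (List.count 1 s : Int), 0 + 2 * (List.count 2 s : Int), 0 + 3 * (List.count 3 s : Int), 0 + 4 * (List.count 4 s : Int), 0 + 5 * (List.count 5 s : Int), 0 + 6 * (List.count 6 s : Int), 0 + 7 * (List.count 7 s : Int), 0 + 8 * (List.count 8 s : Int), 0 + 9 * (List.count 9 s : Int)] : List Int) : List Int) (7 : Int) 0 = 0 + 7 * (List.count 7 s : Int) := rfl
  have r8 : PySem.List.pyGetD (([0 + 0 * (List.count 0 s : Int), 0 + 1 * (List.count 1 s : Int), 0 + 2 * (List.count 2 s : Int), 0 + 3 * (List.count 3 s : Int), 0 + 4 * (List.count 4 s : Int), 0 + 5 * (List.count 5 s : Int), 0 + 6 * (List.count 6 s : Int), 0 + 7 * (List.count 7 s : Int), 0 + 8 * (List.count 8 s : Int), 0 + 9 * (List.count 9 s : Int)] : List Int) : List Int) (8 : Int) 0 = 0 + 8 * (List.count 8 s : Int) := rfl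
  have r9 : PySem.List.pyGetD (([0 + 0 * (List.count 0 s : Int), 0 + 1 * (List.count 1 s : Int), 0 + 2 * (List.count 2 s : Int), 0 + 3 * (List.count 3 s : Int), 0 + 4 * (List.count 4 s : Int), 0 + 5 * (List.count 5 s : Int), 0 + 6 * (List.count 6 s : Int), 0 + 7 * (List.count 7 s : Int), 0 + 8 * (List.count 8 s : Int), 0 + 9 * (List.count 9 s : Int)] : List Int) : List Int) (9 : Int) 0 = 0 + 9 * (List.count 9 s : Int) := rfl
  simp only [r0, r1, r2, r3, r4, r5, r6, r7, r8, r9]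
  simp only [beq_iff_eq, zero_add, mul_eq_zero, Nat.cast_eq_zero, List.count_eq_zero, hcnt]
  rw [Bsum numbers]
  simp only [List.filter_cons, List.filter_nil, List.contains_iff_mem, apply_ite List.sum,
    List.sum_cons, List.sum_nil, ite_add_left]
  norm_num [ite_not]
  have key : ∀ (c : Prop) (_ : Decidable c) (k : Int), (if c then (0:Int) else k) = k - (if c then k else 0) := by
    intro c i k
    split_ifs <;> ring
  simp only [key]
  ring

-- ===== VERDICT (by name: the statement is the Claim_ definition above) =====
theorem solution_spec : Claim_equal_solution := by
  intro numbers _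
  unfold Spec_solution
  exact solution_eq_alt numbers
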